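-- pv_equiv track=rewrite | github.com/Krishil-Parikh/llm_exp_7 | backend/agent.py | _truncate_response_at_action
-- ===== SOURCE A (Python) =====
-- def _truncate_response_at_action(text: str) -> str:
--     """
--     Truncate the model response after Action Input line.
--     This prevents hallucinated observations from being included in the scratchpad.
--     """
--     lines = text.strip().split("\n")
--     result_lines = []
--     found_action_input = False
--
--     for line in lines:
--         result_lines.append(line)
--         if line.strip().startswith("Action Input:"):
--             found_action_input = True
--         elif found_action_input:
--             # If we've passed Action Input and hit a new marker, stop
--             if any(line.strip().startswith(m) for m in
--                    ["Observation:", "Final Answer:", "Thought:"]):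
--                 result_lines.pop()  # Remove this hallucinated line
--                 break
--
--     return "\n".join(result_lines)
-- ===== SOURCE B (Python) =====
-- def _truncate_response_at_action(text: str) -> str:
--     """Index-based: locate the first 'Action Input:' line, then the first
--     marker line after it, and slice; no append/pop accumulator."""
--     lines = text.strip().split("\n")
--     i = next((k for k, l in enumerate(lines)
--               if l.strip().startswith("Action Input:")), None)
--     if i is not None:
--         for j in range(i + 1, len(lines)):
--             if lines[j].strip().startswith(("Observation:", "Final Answer:", "Thought:")):
--                 return "\n".join(lines[:j])
--     return "\n".join(lines)
-- ===== Notes on version B (the rewrite author's own statement) =====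
-- stated objective: alternative
-- what changed: Replaces A's append/pop accumulator loop with a carried found-flag by index arithmetic: find the index of the first action-input line, then the index of the first marker line after it, and return a slice join.
import Mathlib
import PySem

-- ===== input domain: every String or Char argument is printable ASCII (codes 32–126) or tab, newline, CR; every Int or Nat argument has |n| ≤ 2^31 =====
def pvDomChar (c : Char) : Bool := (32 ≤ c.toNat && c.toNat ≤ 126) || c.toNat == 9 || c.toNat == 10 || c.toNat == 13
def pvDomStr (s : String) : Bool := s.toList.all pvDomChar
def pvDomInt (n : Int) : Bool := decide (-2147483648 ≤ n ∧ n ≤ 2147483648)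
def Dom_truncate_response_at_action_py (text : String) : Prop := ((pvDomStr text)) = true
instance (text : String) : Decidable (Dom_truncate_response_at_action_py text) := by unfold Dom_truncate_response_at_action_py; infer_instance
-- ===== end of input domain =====

-- B replaces A's append/pop accumulator loop by index search and slicing (objective: alternative, same cost).

-- ===== PORT A =====
-- line.strip().startswith("Action Input:")
def pvIsActionInput (l : String) : Bool :=
  PySem.Str.startswith (PySem.Str.strip l) "Action Input:"

-- any(line.strip().startswith(m) for m in ["Observation:", "Final Answer:", "Thought:"])
def pvIsMarker (l : String) : Bool :=
  ["Observation:", "Final Answer:", "Thought:"].any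
    (fun m => PySem.Str.startswith (PySem.Str.strip l) m)

-- A's for-loop: append each line; set the flag on "Action Input:"; once the flag
-- is set, pop-and-break on the first marker line (structural recursion over the
-- same state: the flag; the returned list is result_lines).
def pvALoop : List String → Bool → List String
  | [], _ => []
  | l :: rest, found =>
    if pvIsActionInput l then l :: pvALoop rest true
    else if found && pvIsMarker l then []
    else l :: pvALoop rest found

-- text.strip().split("\n"); sep ≠ "" so split? is always some (getD is exact here)
def truncate_response_at_action_py (text : String) : String :=
  PySem.Str.join "\n" (pvALoop ((PySem.Str.split? (PySem.Str.strip text) "\n").getD []) false)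

-- ===== PORT B =====
-- text.strip().split("\n"); sep ≠ "" so split? is always some (getD is exact here)
def truncate_response_at_action_py_alt (text : String) : String :=
  match ((PySem.Str.split? (PySem.Str.strip text) "\n").getD []).findIdx? pvIsActionInput with
  | none => PySem.Str.join "\n" ((PySem.Str.split? (PySem.Str.strip text) "\n").getD [])
  | some i =>
    match (((PySem.Str.split? (PySem.Str.strip text) "\n").getD []).drop (i + 1)).findIdx? pvIsMarker with
    | none => PySem.Str.join "\n" ((PySem.Str.split? (PySem.Str.strip text) "\n").getD [])
    | some k => PySem.Str.join "\n" (((PySem.Str.split? (PySem.Str.strip text) "\n").getD []).take (i + 1 + k))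

-- ===== PRECONDITION & SPEC =====
def Spec_truncate_response_at_action_py (text : String) (out : String) : Prop := out = truncate_response_at_action_py_alt text
instance (text : String) (out : String) : Decidable (Spec_truncate_response_at_action_py text out) := by unfold Spec_truncate_response_at_action_py; infer_instance

-- ===== CLAIM (what is proved, stated in full; the proofs are below) =====
def Claim_equal_truncate_response_at_action_py : Prop := ∀ (text : String), Dom_truncate_response_at_action_py text → Spec_truncate_response_at_action_py text (truncate_response_at_action_py text)

-- ===== LEMMAS AND PROOFS =====

-- a line starting with "Action Input:" starts with none of the markers
theorem pvMarker_of_actionInput (l : String) (h : pvIsActionInput l = true) :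
    pvIsMarker l = false := by
  unfold pvIsActionInput at h
  unfold pvIsMarker
  simp only [PySem.Str.startswith_eq] at h ⊢
  rw [PySem.Chars.startswith_iff] at h
  simp only [List.any_cons, List.any_nil, Bool.or_eq_false_iff]
  refine ⟨?_, ?_, ?_, trivial⟩ <;>
  · rw [Bool.eq_false_iff, Ne, PySem.Chars.startswith_iff]
    intro hm
    rcases List.prefix_or_prefix_of_prefix h hm with hp | hp <;> revert hp <;> decide

-- with the flag set, A's loop keeps everything before the first marker line
theorem pvALoop_true (rest : List String) :
    pvALoop rest true =
      match rest.findIdx? pvIsMarker with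
      | none => rest
      | some k => rest.take k := by
  induction rest with
  | nil => rfl
  | cons l rest ih =>
    by_cases hp : pvIsActionInput l = true
    · have hq := pvMarker_of_actionInput l hp
      simp only [pvALoop, hp, if_true, ih, List.findIdx?_cons, hq, cond_false]
      cases rest.findIdx? pvIsMarker <;> simp
    · simp only [pvALoop, hp, if_false, Bool.true_and]
      by_cases hq : pvIsMarker l = true
      · simp [List.findIdx?_cons, hq]
      · rw [Bool.not_eq_true] at hq
        simp only [hq, if_false, ih, List.findIdx?_cons, cond_false]
        cases rest.findIdx? pvIsMarker <;> simp

-- A's loop from the initial state computes B's index-based selection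
theorem pvALoop_false (lines : List String) :
    pvALoop lines false =
      match lines.findIdx? pvIsActionInput with
      | none => lines
      | some i =>
        match (lines.drop (i + 1)).findIdx? pvIsMarker with
        | none => lines
        | some k => lines.take (i + 1 + k) := by
  induction lines with
  | nil => rfl
  | cons l rest ih =>
    by_cases hp : pvIsActionInput l = true
    · simp only [pvALoop, hp, if_true, pvALoop_true, List.findIdx?_cons, cond_true,
        List.drop_succ_cons, List.drop_zero]
      cases rest.findIdx? pvIsMarker with
      | none => rfl
      | some k => simp [Nat.add_comm 1 k, List.take_succ_cons]
    · rw [Bool.not_eq_true] at hp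
      simp only [pvALoop, hp, if_false, Bool.false_and, ih, List.findIdx?_cons, cond_false]
      cases hfi : rest.findIdx? pvIsActionInput with
      | none => simp
      | some i =>
        simp only [Option.map_some, List.drop_succ_cons]
        cases hfm : (rest.drop (i + 1)).findIdx? pvIsMarker with
        | none => simp [hfm]
        | some k =>
          have h2 : i + 1 + 1 + k = (i + 1 + k) + 1 := by omega
          simp [hfm, h2, List.take_succ_cons]

-- ===== VERDICT (by name: the statement is the Claim_ definition above) =====
theorem truncate_response_at_action_py_spec : Claim_equal_truncate_response_at_action_py := by
  intro text _
  unfold Spec_truncate_response_at_action_py truncate_response_at_action_py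
    truncate_response_at_action_py_alt
  generalize (PySem.Str.split? (PySem.Str.strip text) "\n").getD [] = lines
  rw [pvALoop_false]
  cases h1 : lines.findIdx? pvIsActionInput with
  | none => simp [h1]
  | some i => cases h2 : (lines.drop (i + 1)).findIdx? pvIsMarker <;> simp [h1, h2]
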